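-- pv_equiv track=rewrite | github.com/buffett0323/IDL_final_3small | agents/sttr_enzh_agent.py | _majority_vote_at
-- ===== SOURCE A (Python) =====
-- def _majority_vote_at(candidates: list[list[str]], pos: int) -> str | None:
--     """Return the majority character at position *pos* across candidates.
--
--     Returns the character if a strict majority (> 50%) of candidates agree,
--     otherwise None.
--     """
--     votes: dict[str, int] = {}
--     for cand in candidates:
--         if pos < len(cand):
--             ch = cand[pos]
--             votes[ch] = votes.get(ch, 0) + 1
--     if not votes:
--         return None
--     best_ch, best_count = max(votes.items(), key=lambda x: x[1])
--     if best_count > len(candidates) / 2: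
--         return best_ch
--     return None
-- ===== SOURCE B (Python) =====
-- def _majority_vote_at(candidates: list[list[str]], pos: int) -> str | None:
--     """Boyer-Moore majority vote at position *pos*, verified against len(candidates)."""
--     leader = None
--     count = 0
--     for cand in candidates:
--         if pos < len(cand):
--             ch = cand[pos]
--             if count == 0:
--                 leader = ch
--                 count = 1
--             elif ch == leader:
--                 count += 1
--             else:
--                 count -= 1
--     if leader is None:
--         return None
--     support = 0
--     for cand in candidates:
--         if pos < len(cand) and cand[pos] == leader:
--             support += 1
--     if 2 * support > len(candidates):
--         return leader
--     return None
-- ===== Notes on version B (the rewrite author's own statement) =====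
-- stated objective: alternative
-- what changed: Replaced the per-character counting dict plus max-by-count with Boyer-Moore majority voting (single leader/count pair) followed by one verification pass against len(candidates).
import Mathlib
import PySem

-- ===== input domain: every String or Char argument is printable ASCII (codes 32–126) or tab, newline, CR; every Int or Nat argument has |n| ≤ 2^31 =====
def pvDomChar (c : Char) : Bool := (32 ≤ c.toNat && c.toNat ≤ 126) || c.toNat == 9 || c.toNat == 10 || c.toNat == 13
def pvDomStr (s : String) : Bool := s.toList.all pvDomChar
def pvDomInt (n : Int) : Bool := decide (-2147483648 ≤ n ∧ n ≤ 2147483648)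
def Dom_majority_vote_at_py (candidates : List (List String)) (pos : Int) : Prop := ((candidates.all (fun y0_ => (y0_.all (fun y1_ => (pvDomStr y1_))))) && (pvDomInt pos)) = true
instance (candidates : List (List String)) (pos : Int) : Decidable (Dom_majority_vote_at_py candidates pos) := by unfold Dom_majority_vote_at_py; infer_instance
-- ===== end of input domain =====

-- B replaces A's counting dict + max-by-count with Boyer-Moore majority voting plus one
-- verification pass (objective: alternative algorithm).


-- ===== PORT A =====
-- literal port of _majority_vote_at: build the votes dict, take max(items, key=count),
-- return it iff best_count > len(candidates)/2 (ported as 2*best_count > len, exact on ints).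
-- The `| none => votes` branch is Python's IndexError (pos negative, past the front), excluded by Pre_.
def majority_vote_at_py (candidates : List (List String)) (pos : Int) : Option String :=
  let votes : PySem.Dict String Int := candidates.foldl (fun votes cand =>
    if pos < (cand.length : Int) then
      match PySem.List.pyGet? cand pos with
      | some ch => votes.insert ch (votes.getD ch 0 + 1)
      | none => votes
    else votes) PySem.Dict.empty
  if votes.size = 0 then none
  else
    match PySem.List.max? votes.items (fun x => x.2) with
    | some best => if 2 * best.2 > (candidates.length : Int) then some best.1 else none
    | none => none

-- ===== PORT B =====
-- literal port of Source B: Boyer-Moore pass keeping (leader, count), then a verification pass.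
-- The `| none => st` / `| none => acc` branches are Python's IndexError, excluded by Pre_.
def majority_vote_at_py_alt (candidates : List (List String)) (pos : Int) : Option String :=
  let st : Option String × Int := candidates.foldl (fun st cand =>
    if pos < (cand.length : Int) then
      match PySem.List.pyGet? cand pos with
      | some ch =>
        if st.2 = 0 then (some ch, 1)
        else if some ch = st.1 then (st.1, st.2 + 1)
        else (st.1, st.2 - 1)
      | none => st
    else st) (none, 0)
  match st.1 with
  | none => none
  | some leader =>
    let support : Int := candidates.foldl (fun acc cand =>
      if pos < (cand.length : Int) then
        match PySem.List.pyGet? cand pos with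
        | some ch => if ch == leader then acc + 1 else acc
        | none => acc
      else acc) 0
    if 2 * support > (candidates.length : Int) then some leader else none

-- ===== PRECONDITION & SPEC =====
-- Pre_ excludes exactly the inputs where Python raises IndexError: a negative pos that
-- reaches past the front of some candidate (there pos < len(cand) holds but cand[pos] raises).
def Pre_majority_vote_at_py (candidates : List (List String)) (pos : Int) : Prop :=
  ∀ cand ∈ candidates, pos < (cand.length : Int) → -(cand.length : Int) ≤ pos
instance (candidates : List (List String)) (pos : Int) : Decidable (Pre_majority_vote_at_py candidates pos) := by unfold Pre_majority_vote_at_py; infer_instance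
def pvWitness_majority_vote_at_py : List (List String) × Int := ([["a"], ["a"], ["b"]], 0)
def Spec_majority_vote_at_py (candidates : List (List String)) (pos : Int) (out : Option String) : Prop := out = majority_vote_at_py_alt candidates pos
instance (candidates : List (List String)) (pos : Int) (out : Option String) : Decidable (Spec_majority_vote_at_py candidates pos out) := by unfold Spec_majority_vote_at_py; infer_instance

-- ===== CLAIM (what is proved, stated in full; the proofs are below) =====
def Claim_equal_majority_vote_at_py : Prop := ∀ (candidates : List (List String)) (pos : Int), Dom_majority_vote_at_py candidates pos → Pre_majority_vote_at_py candidates pos → Spec_majority_vote_at_py candidates pos (majority_vote_at_py candidates pos)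

-- ===== LEMMAS AND PROOFS =====

-- the stream of characters actually collected: cand[pos] for each cand with pos < len(cand)
def pvStream (candidates : List (List String)) (pos : Int) : List String :=
  candidates.filterMap (fun cand => if pos < (cand.length : Int) then PySem.List.pyGet? cand pos else none)

-- the Boyer-Moore step of port B, as a named function (definitionally the port's lambda body)
def pvBmStep (st : Option String × Int) (ch : String) : Option String × Int :=
  if st.2 = 0 then (some ch, 1)
  else if some ch = st.1 then (st.1, st.2 + 1)
  else (st.1, st.2 - 1)

lemma pvStream_cons (cand : List String) (t : List (List String)) (pos : Int) :
    pvStream (cand :: t) pos =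
      (if pos < (cand.length : Int) then
        match PySem.List.pyGet? cand pos with
        | some ch => ch :: pvStream t pos
        | none => pvStream t pos
      else pvStream t pos) := by
  simp only [pvStream, List.filterMap_cons]
  split_ifs with h
  · cases PySem.List.pyGet? cand pos <;> rfl
  · rfl

lemma pvVotesFold_eq (pos : Int) :
    ∀ (cands : List (List String)) (d : PySem.Dict String Int),
    cands.foldl (fun votes cand =>
      if pos < (cand.length : Int) then
        match PySem.List.pyGet? cand pos with
        | some ch => votes.insert ch (votes.getD ch 0 + 1)
        | none => votes
      else votes) d
    = (pvStream cands pos).foldl (fun d ch => d.insert ch (d.getD ch 0 + 1)) d := by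
  intro cands
  induction cands with
  | nil => intro d; rfl
  | cons cand t ih =>
    intro d
    simp only [List.foldl_cons, pvStream_cons]
    by_cases h : pos < (cand.length : Int)
    · rw [if_pos h, if_pos h]
      cases hg : PySem.List.pyGet? cand pos with
      | none => exact ih d
      | some ch =>
        show List.foldl _ _ t = List.foldl (fun d ch => d.insert ch (d.getD ch 0 + 1)) d (ch :: pvStream t pos)
        rw [List.foldl_cons, ih]
    · rw [if_neg h, if_neg h]; exact ih d

lemma pvBmFold_eq (pos : Int) :
    ∀ (cands : List (List String)) (st : Option String × Int),
    cands.foldl (fun st cand =>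
      if pos < (cand.length : Int) then
        match PySem.List.pyGet? cand pos with
        | some ch =>
          if st.2 = 0 then (some ch, 1)
          else if some ch = st.1 then (st.1, st.2 + 1)
          else (st.1, st.2 - 1)
        | none => st
      else st) st
    = (pvStream cands pos).foldl pvBmStep st := by
  intro cands
  induction cands with
  | nil => intro st; rfl
  | cons cand t ih =>
    intro st
    simp only [List.foldl_cons, pvStream_cons]
    by_cases h : pos < (cand.length : Int)
    · rw [if_pos h, if_pos h]
      cases hg : PySem.List.pyGet? cand pos with
      | none => exact ih st
      | some ch =>
        show List.foldl _ _ t = List.foldl pvBmStep st (ch :: pvStream t pos)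
        rw [List.foldl_cons, ih]; rfl
    · rw [if_neg h, if_neg h]; exact ih st

lemma pvSupportFold_eq (pos : Int) (c : String) :
    ∀ (cands : List (List String)) (a : Int),
    cands.foldl (fun acc cand =>
      if pos < (cand.length : Int) then
        match PySem.List.pyGet? cand pos with
        | some ch => if ch == c then acc + 1 else acc
        | none => acc
      else acc) a
    = (pvStream cands pos).foldl (fun acc ch => if ch == c then acc + 1 else acc) a := by
  intro cands
  induction cands with
  | nil => intro a; rfl
  | cons cand t ih =>
    intro a
    simp only [List.foldl_cons, pvStream_cons]
    by_cases h : pos < (cand.length : Int)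
    · rw [if_pos h, if_pos h]
      cases hg : PySem.List.pyGet? cand pos with
      | none => exact ih a
      | some ch =>
        show List.foldl _ _ t = List.foldl (fun acc ch => if ch == c then acc + 1 else acc) a (ch :: pvStream t pos)
        rw [List.foldl_cons, ih]
    · rw [if_neg h, if_neg h]; exact ih a

-- two distinct values cannot both fill more than the whole list
lemma pvCount_add_count_le (a b : String) (hab : a ≠ b) :
    ∀ (s : List String), s.count a + s.count b ≤ s.length := by
  intro s
  induction s with
  | nil => simp
  | cons x t ih =>
    simp only [List.count_cons, List.length_cons]
    by_cases hxa : x = a <;> by_cases hxb : x = b <;> simp_all <;> omega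

-- once the leader is some, it never returns to none
lemma pvBm_ne_none : ∀ (s : List String) (st : Option String × Int),
    st.1 ≠ none → (s.foldl pvBmStep st).1 ≠ none := by
  intro s
  induction s with
  | nil => intro st h; exact h
  | cons x t ih =>
    intro st h
    rw [List.foldl_cons]
    apply ih
    unfold pvBmStep
    split_ifs <;> simp_all

-- a none leader can only result from an empty stream (given the sane-start invariant)
lemma pvBm_none (s : List String) (st : Option String × Int)
    (hinv : st.2 = 0 ∨ st.1 ≠ none) (hres : (s.foldl pvBmStep st).1 = none) : s = [] := by
  cases s with
  | nil => rfl
  | cons x t =>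
    exfalso
    rw [List.foldl_cons] at hres
    have h2 : (pvBmStep st x).1 ≠ none := by
      unfold pvBmStep
      split_ifs with h1 h2 <;> simp only []
      · simp
      · rcases hinv with h | h
        · exact absurd h h1
        · exact h
      · rcases hinv with h | h
        · exact absurd h h1
        · exact h
    exact pvBm_ne_none t (pvBmStep st x) h2 hres

-- the final leader is the initial one or an element of the stream
lemma pvBm_mem : ∀ (s : List String) (st : Option String × Int) (c : String),
    (s.foldl pvBmStep st).1 = some c → st.1 = some c ∨ c ∈ s := by
  intro s
  induction s with
  | nil => intro st c h; exact Or.inl h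
  | cons x t ih =>
    intro st c h
    rw [List.foldl_cons] at h
    rcases ih (pvBmStep st x) c h with h' | h'
    · unfold pvBmStep at h'
      split_ifs at h' with h1 h2
      · exact Or.inr (by simp_all)
      · exact Or.inl h'
      · exact Or.inl h'
    · exact Or.inr (List.mem_cons_of_mem x h')

-- Boyer-Moore finds any strict majority of the stream
lemma pvBm_maj : ∀ (s : List String) (st : Option String × Int) (a : String),
    0 ≤ st.2 →
    (s.length : Int) + (if st.1 = some a then -st.2 else st.2) < 2 * (s.count a : Int) →
    (s.foldl pvBmStep st).1 = some a := by
  intro s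
  induction s with
  | nil =>
    intro st a h0 hmaj
    simp only [List.foldl_nil, List.length_nil, List.count_nil] at *
    by_cases h : st.1 = some a
    · exact h
    · rw [if_neg h] at hmaj; omega
  | cons x t ih =>
    intro st a h0 hmaj
    rw [List.foldl_cons]
    rw [List.length_cons] at hmaj
    by_cases h1 : st.2 = 0
    · have hw : (if st.1 = some a then -st.2 else st.2) = 0 := by split_ifs <;> omega
      rw [hw] at hmaj
      have hstep : pvBmStep st x = (some x, 1) := by simp [pvBmStep, h1]
      rw [hstep]
      apply ih _ a (by norm_num)
      by_cases hxa : x = a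
      · subst hxa
        have hc : (x :: t).count x = t.count x + 1 := by simp
        rw [hc] at hmaj; rw [if_pos rfl]; push_cast at hmaj ⊢; omega
      · have hc : (x :: t).count a = t.count a := by simp [hxa]
        rw [hc] at hmaj
        rw [if_neg (by simp [hxa])]
        push_cast at hmaj ⊢; omega
    · by_cases h2 : some x = st.1
      · have hstep : pvBmStep st x = (st.1, st.2 + 1) := by simp [pvBmStep, h1, h2]
        rw [hstep]
        apply ih _ a (by simp; omega)
        by_cases hsa : st.1 = some a
        · have hxa : x = a := by rw [hsa] at h2; exact Option.some.inj h2
          subst hxa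
          have hc : (x :: t).count x = t.count x + 1 := by simp
          rw [hc, if_pos hsa] at hmaj
          simp only [if_pos hsa]
          push_cast at hmaj ⊢; omega
        · have hxa : x ≠ a := fun he => hsa (he ▸ h2.symm)
          have hc : (x :: t).count a = t.count a := by simp [hxa]
          rw [hc, if_neg hsa] at hmaj
          simp only [if_neg hsa]
          push_cast at hmaj ⊢; omega
      · have hstep : pvBmStep st x = (st.1, st.2 - 1) := by simp [pvBmStep, h1, h2]
        rw [hstep]
        apply ih _ a (by simp; omega)
        by_cases hsa : st.1 = some a
        · have hxa : x ≠ a := fun he => h2 (by rw [he, hsa])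
          have hc : (x :: t).count a = t.count a := by simp [hxa]
          rw [hc, if_pos hsa] at hmaj
          simp only [if_pos hsa]
          push_cast at hmaj ⊢; omega
        · by_cases hxa : x = a
          · have hc : (x :: t).count a = t.count a + 1 := by simp [hxa]
            rw [hc, if_neg hsa] at hmaj
            simp only [if_neg hsa]
            push_cast at hmaj ⊢; omega
          · have hc : (x :: t).count a = t.count a := by simp [hxa]
            rw [hc, if_neg hsa] at hmaj
            simp only [if_neg hsa]
            push_cast at hmaj ⊢; omega

-- the main equivalence, unconditionally on the ports
lemma pvMain (candidates : List (List String)) (pos : Int) :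
    majority_vote_at_py candidates pos = majority_vote_at_py_alt candidates pos := by
  simp only [majority_vote_at_py, majority_vote_at_py_alt, pvVotesFold_eq, pvBmFold_eq,
    pvSupportFold_eq, PySem.Dict.foldl_insert_getD_add_one_eq_counter,
    PySem.List.foldl_beq_add_one, zero_add]
  set s := pvStream candidates pos with hs
  have hlen : s.length ≤ candidates.length := List.length_filterMap_le _ _
  rcases hbm : (List.foldl pvBmStep ((none : Option String), (0 : Int)) s).1 with _ | c
  · -- leader is none: the stream is empty, both sides return none
    have hnil : s = [] := pvBm_none s (none, 0) (Or.inl rfl) hbm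
    rw [hnil]
    rfl
  · -- leader is c
    have hcmem : c ∈ s := by
      rcases pvBm_mem s (none, 0) c hbm with h | h
      · exact absurd h (by simp)
      · exact h
    have hsize : ¬ ((PySem.Dict.counter s : PySem.Dict String Int).size = 0) := by
      have : (c, (s.count c : Int)) ∈ (PySem.Dict.counter s : PySem.Dict String Int).items := by
        rw [PySem.Dict.items_counter]
        exact List.mem_map_of_mem ((PySem.Set.mem_ofList _ _).2 hcmem)
      intro h0
      rw [PySem.Dict.size] at h0
      rw [List.length_eq_zero_iff.1 h0] at this
      exact (List.not_mem_nil) this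
    rw [if_neg hsize]
    have hitems_ne : (PySem.Dict.counter s : PySem.Dict String Int).items ≠ [] := by
      intro h; exact hsize (by rw [PySem.Dict.size, h]; rfl)
    rcases hmax : PySem.List.max? (PySem.Dict.counter s : PySem.Dict String Int).items (fun x => x.2) with _ | m
    · exact absurd (PySem.List.max?_eq_none_iff _ _ |>.1 hmax) hitems_ne
    · have hmmem := PySem.List.max?_mem hmax
      rw [PySem.Dict.items_counter] at hmmem
      obtain ⟨k, hk, hmk⟩ := List.mem_map.1 hmmem
      have hkmem : k ∈ s := (PySem.Set.mem_ofList _ _).1 hk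
      have hcitem : (c, (s.count c : Int)) ∈ (PySem.Dict.counter s : PySem.Dict String Int).items := by
        rw [PySem.Dict.items_counter]
        exact List.mem_map_of_mem ((PySem.Set.mem_ofList _ _).2 hcmem)
      have hle : (s.count c : Int) ≤ m.2 := PySem.List.max?_isMax hmax _ hcitem
      have hm2 : m.2 = (s.count k : Int) := by rw [← hmk]
      have hm1 : m.1 = k := by rw [← hmk]
      show (if 2 * m.2 > (candidates.length : Int) then some m.1 else none)
           = (if 2 * (s.count c : Int) > (candidates.length : Int) then some c else none)
      by_cases hmaj : 2 * (s.count c : Int) > (candidates.length : Int)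
      · -- strict majority: both return some c; the dict's best key must be c
        rw [if_pos hmaj]
        have hkc : k = c := by
          by_contra hkc
          have := pvCount_add_count_le k c hkc s
          omega
        rw [if_pos (by rw [hm2, hkc]; omega), hm1, hkc]
      · -- no strict majority of c; A's best count cannot be a strict majority either
        rw [if_neg hmaj]
        have hknot : ¬ (2 * (s.count k : Int) > (candidates.length : Int)) := by
          intro hkm
          have hfind : (List.foldl pvBmStep ((none : Option String), (0 : Int)) s).1 = some k := by
            apply pvBm_maj s (none, 0) k (by norm_num)
            rw [if_neg (by simp)]
            omega
          rw [hbm] at hfind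
          exact hmaj (Option.some.inj hfind ▸ hkm)
        rw [if_neg (by rw [hm2]; exact hknot)]

-- ===== VERDICT (by name: the statement is the Claim_ definition above) =====
theorem majority_vote_at_py_spec : Claim_equal_majority_vote_at_py := by
  intro candidates pos _ _
  unfold Spec_majority_vote_at_py
  exact pvMain candidates pos
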